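-- pv_equiv track=rewrite | github.com/skyline9981/Introduction-to-Computers | Assignment3/simple_calculator.py | check_plus
-- ===== SOURCE A (Python) =====
-- def check_plus(str1):
--     """
--     To check error for the addition part.
--     """
--     number1 = ""
--     number2 = ""
--     b = False
--     plus = False
--     for i in str1:
--         if i == "+":
--             plus = True
--             continue
--         if not plus:
--             number1 += i
--         else:
--             number2 += i
--     for i in number1:
--         if i == ".":
--             continue
--         else:
--             if i.isalpha():
--                 b = True
--                 break
--     for i in number2:
--         if i == ".":
--             continue
--         else:
--             if i.isalpha():
--                 b = True
--                 break
--     return b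
-- ===== SOURCE B (Python) =====
-- def check_plus(str1):
--     # Single direct scan: the separator and dot characters are never alphabetic, so A's split
--     # and per-side scans reduce to "any letter anywhere".
--     return any(c.isalpha() for c in str1)
-- ===== Notes on version B (the rewrite author's own statement) =====
-- stated objective: simpler
-- what changed: Replaced the split-at-plus into two buffers plus two break-on-letter scans by one direct any(isalpha) pass over the whole string, since the separator and decimal-point characters are never alphabetic.
import Mathlib
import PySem

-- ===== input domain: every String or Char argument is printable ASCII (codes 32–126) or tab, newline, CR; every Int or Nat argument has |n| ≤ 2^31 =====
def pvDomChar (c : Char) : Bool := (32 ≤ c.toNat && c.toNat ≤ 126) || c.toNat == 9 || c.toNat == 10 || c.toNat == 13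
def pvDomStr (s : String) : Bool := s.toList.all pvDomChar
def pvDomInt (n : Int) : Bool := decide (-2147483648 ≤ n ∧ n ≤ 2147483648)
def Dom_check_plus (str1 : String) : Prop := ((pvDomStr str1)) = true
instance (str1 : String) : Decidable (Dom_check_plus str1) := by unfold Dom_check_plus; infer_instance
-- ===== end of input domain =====

-- B replaces A's split-into-two-buffers plus two break scans by one direct any-isalpha pass (simpler); the skipped characters are never alphabetic.

-- ===== PORT A =====
-- split loop: state (number1, number2, plus); strings kept as List Char
def checkPlusSplit : List Char → List Char × List Char × Bool → List Char × List Char × Bool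
  | [], st => st
  | i :: rest, st =>
    if i == '+' then checkPlusSplit rest (st.1, st.2.1, true)
    else if !st.2.2 then checkPlusSplit rest (st.1 ++ [i], st.2.1, st.2.2)
    else checkPlusSplit rest (st.1, st.2.1 ++ [i], st.2.2)

-- one of A's scan loops: skip '.', break (return true) at a letter, else keep b
def checkPlusScan (l : List Char) (b : Bool) : Bool :=
  match l with
  | [] => b
  | i :: rest => if i == '.' then checkPlusScan rest b
                 else if PySem.Chars.isalpha i then true
                 else checkPlusScan rest b

def check_plus (str1 : String) : Bool :=
  let s := checkPlusSplit str1.toList ([], [], false)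
  let b := checkPlusScan s.1 false
  checkPlusScan s.2.1 b

-- ===== PORT B =====
def check_plus_alt (str1 : String) : Bool :=
  str1.toList.any PySem.Chars.isalpha

-- ===== PRECONDITION & SPEC =====
def Spec_check_plus (str1 : String) (out : Bool) : Prop := out = check_plus_alt str1
instance (str1 : String) (out : Bool) : Decidable (Spec_check_plus str1 out) := by unfold Spec_check_plus; infer_instance

-- ===== CLAIM (what is proved, stated in full; the proofs are below) =====
def Claim_equal_check_plus : Prop := ∀ (str1 : String), Dom_check_plus str1 → Spec_check_plus str1 (check_plus str1)

-- ===== LEMMAS AND PROOFS =====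

theorem scan_eq_any (l : List Char) (b : Bool) :
    checkPlusScan l b = (b || l.any PySem.Chars.isalpha) := by
  induction l with
  | nil => simp [checkPlusScan]
  | cons i rest ih =>
    by_cases hdot : i = '.'
    · subst hdot
      have h : PySem.Chars.isalpha '.' = false := by decide
      simp [checkPlusScan, ih, h]
    · by_cases ha : PySem.Chars.isalpha i = true
      · simp [checkPlusScan, hdot, ha]
      · simp [checkPlusScan, hdot, ha, ih]

theorem split_any (l : List Char) (n1 n2 : List Char) (p : Bool) :
    ((checkPlusSplit l (n1, n2, p)).1.any PySem.Chars.isalpha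
      || (checkPlusSplit l (n1, n2, p)).2.1.any PySem.Chars.isalpha)
    = (n1.any PySem.Chars.isalpha || n2.any PySem.Chars.isalpha
        || l.any PySem.Chars.isalpha) := by
  induction l generalizing n1 n2 p with
  | nil => simp [checkPlusSplit]
  | cons i rest ih =>
    by_cases hp : i = '+'
    · subst hp
      have h1 : checkPlusSplit ('+' :: rest) (n1, n2, p)
          = checkPlusSplit rest (n1, n2, true) := by simp [checkPlusSplit]
      have h : PySem.Chars.isalpha '+' = false := by decide
      rw [h1, ih]
      simp [h]
    · cases p with
      | false =>
        have h1 : checkPlusSplit (i :: rest) (n1, n2, false)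
            = checkPlusSplit rest (n1 ++ [i], n2, false) := by
          simp [checkPlusSplit, hp]
        rw [h1, ih]
        cases ha : PySem.Chars.isalpha i <;>
          simp [ha, List.any_append, Bool.or_comm]
      | true =>
        have h1 : checkPlusSplit (i :: rest) (n1, n2, true)
            = checkPlusSplit rest (n1, n2 ++ [i], true) := by
          simp [checkPlusSplit, hp]
        rw [h1, ih]
        cases ha : PySem.Chars.isalpha i <;>
          simp [ha, List.any_append, Bool.or_comm]

-- ===== VERDICT (by name: the statement is the Claim_ definition above) =====
theorem check_plus_spec : Claim_equal_check_plus := by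
  intro str1 _
  unfold Spec_check_plus check_plus check_plus_alt
  simp only [scan_eq_any, Bool.false_or]
  have h := split_any str1.toList [] [] false
  simpa using h
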